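-- pv_equiv track=rewrite | github.com/sriram100445/Clientpj | app.py | calculate_shipping_by_quantity
-- ===== SOURCE A (Python) =====
-- def calculate_shipping_by_quantity(items):
--     """
--     items = list of cart items
--     each item has quantity
--     """
--
--     total_qty = sum(item["quantity"] for item in items)
--
--     if 1 <= total_qty <= 4:
--         shipping = 50
--     elif 5 <= total_qty <= 8:
--         shipping = 65
--     elif 9 <= total_qty <= 12:
--         shipping = 100
--     elif 13 <= total_qty <= 16:
--         shipping = 130
--     else:
--         shipping = 0  # or keep 0 and handle manually
--
--     return shipping, total_qty
-- ===== SOURCE B (Python) =====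
-- def _ladder(t, rates):
--     # walk down the rate ladder, consuming 4 units per rung;
--     # the rung we stop on gives the shipping rate, off the ladder -> 0
--     if t < 1 or not rates:
--         return 0
--     if t <= 4:
--         return rates[0]
--     return _ladder(t - 4, rates[1:])
--
-- def calculate_shipping_by_quantity(items):
--     total_qty = 0
--     for item in items:
--         total_qty += item["quantity"]
--     return _ladder(total_qty, [50, 65, 100, 130]), total_qty
-- ===== Notes on version B (the rewrite author's own statement) =====
-- stated objective: alternative
-- what changed: Replaces the if-elif range chain with a recursive descent down a rate ladder that consumes 4 units per rung and returns the rate of the rung it stops on (0 once off the ladder), plus an explicit accumulator loop for the total.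
import Mathlib
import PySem

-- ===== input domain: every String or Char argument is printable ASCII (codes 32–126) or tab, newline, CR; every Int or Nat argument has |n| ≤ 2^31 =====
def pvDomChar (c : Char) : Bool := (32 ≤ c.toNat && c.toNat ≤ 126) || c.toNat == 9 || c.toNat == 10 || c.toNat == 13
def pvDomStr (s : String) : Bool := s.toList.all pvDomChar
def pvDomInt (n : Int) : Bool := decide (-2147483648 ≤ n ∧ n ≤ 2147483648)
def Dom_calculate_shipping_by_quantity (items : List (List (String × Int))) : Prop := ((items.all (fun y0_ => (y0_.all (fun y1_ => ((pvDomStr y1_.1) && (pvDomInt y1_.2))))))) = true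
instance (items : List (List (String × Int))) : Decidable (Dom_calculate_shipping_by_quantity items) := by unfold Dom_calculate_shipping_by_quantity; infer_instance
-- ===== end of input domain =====

-- B replaces A's if-elif range chain by a recursive descent down a rate ladder, consuming 4 units per rung (objective: alternative).

-- ===== PORT A =====
-- item["quantity"]: first-match association lookup; getD 0 is only a totalization guard —
-- Pre_ requires the key to be present in every item.
def calculate_shipping_by_quantity (items : List (List (String × Int))) : Int × Int :=
  let total_qty := items.foldl (fun acc item => acc + ((item.lookup "quantity").getD 0)) 0
  let shipping : Int :=
    if 1 ≤ total_qty ∧ total_qty ≤ 4 then 50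
    else if 5 ≤ total_qty ∧ total_qty ≤ 8 then 65
    else if 9 ≤ total_qty ∧ total_qty ≤ 12 then 100
    else if 13 ≤ total_qty ∧ total_qty ≤ 16 then 130
    else 0
  (shipping, total_qty)

-- ===== PORT B =====
-- _ladder: recursion on the rate list, consuming 4 units per rung.
def pvLadder : Int → List Int → Int
  | t, rates =>
    if t < 1 ∨ rates = [] then 0
    else if t ≤ 4 then rates.headD 0
    else pvLadder (t - 4) rates.tail
  termination_by t rates => rates.length
  decreasing_by
    rename_i h _
    cases rates with
    | nil => exact absurd (Or.inr rfl) h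
    | cons r rs => simp

def calculate_shipping_by_quantity_alt (items : List (List (String × Int))) : Int × Int :=
  let total_qty := items.foldl (fun acc item => acc + ((item.lookup "quantity").getD 0)) 0
  (pvLadder total_qty [50, 65, 100, 130], total_qty)

-- ===== PRECONDITION & SPEC =====
-- Pre_ excludes exactly the inputs where A raises KeyError: an item without the "quantity" key.
def Pre_calculate_shipping_by_quantity (items : List (List (String × Int))) : Prop :=
  (items.all (fun item => (item.lookup "quantity").isSome)) = true
instance (items : List (List (String × Int))) : Decidable (Pre_calculate_shipping_by_quantity items) := by unfold Pre_calculate_shipping_by_quantity; infer_instance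
def pvWitness_calculate_shipping_by_quantity : (List (List (String × Int))) := [[("quantity", 3)], [("quantity", 2)]]

def Spec_calculate_shipping_by_quantity (items : List (List (String × Int))) (out : Int × Int) : Prop := out = calculate_shipping_by_quantity_alt items
instance (items : List (List (String × Int))) (out : Int × Int) : Decidable (Spec_calculate_shipping_by_quantity items out) := by unfold Spec_calculate_shipping_by_quantity; infer_instance

-- ===== CLAIM (what is proved, stated in full; the proofs are below) =====
def Claim_equal_calculate_shipping_by_quantity : Prop := ∀ (items : List (List (String × Int))), Dom_calculate_shipping_by_quantity items → Pre_calculate_shipping_by_quantity items → Spec_calculate_shipping_by_quantity items (calculate_shipping_by_quantity items)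

-- ===== LEMMAS AND PROOFS =====

-- Step equations for the ladder.
lemma pv_ladder_nil (t : Int) : pvLadder t [] = 0 := by
  rw [pvLadder]; simp

lemma pv_ladder_cons (t r : Int) (rs : List Int) :
    pvLadder t (r :: rs) = if t < 1 then 0 else if t ≤ 4 then r else pvLadder (t - 4) rs := by
  rw [pvLadder]
  by_cases h : t < 1
  · simp [h]
  · simp [h]

-- The if-elif chain agrees with the ladder descent for every total.
set_option maxHeartbeats 1000000 in
lemma pv_ship_eq (t : Int) :
    (if 1 ≤ t ∧ t ≤ 4 then (50 : Int)
     else if 5 ≤ t ∧ t ≤ 8 then 65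
     else if 9 ≤ t ∧ t ≤ 12 then 100
     else if 13 ≤ t ∧ t ≤ 16 then 130
     else 0)
    = pvLadder t [50, 65, 100, 130] := by
  rw [pv_ladder_cons, pv_ladder_cons, pv_ladder_cons, pv_ladder_cons, pv_ladder_nil]
  split_ifs <;> omega

-- ===== VERDICT (by name: the statement is the Claim_ definition above) =====
theorem calculate_shipping_by_quantity_spec : Claim_equal_calculate_shipping_by_quantity := by
  intro items _ _
  unfold Spec_calculate_shipping_by_quantity
  unfold calculate_shipping_by_quantity calculate_shipping_by_quantity_alt
  simp only []
  rw [pv_ship_eq]
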